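-- pv_equiv track=rewrite | github.com/shkim9604/programmers_coding_test | level0/다항식 더하기.py | solution
-- ===== SOURCE A (Python) =====
-- def solution(polynomial):
--     answer = ''
--     num_sum = [0,0]
--     for i in polynomial.split():
--         if i == 'x':
--             num_sum[0] += 1
--         elif i == '+':
--             continue
--         elif 'x' in i:
--             num_sum[0] += int(i[:-1])
--         else:
--             num_sum[1] += int(i)
--     if not num_sum[0] == 0:
--         if num_sum[0] == 1:
--             answer += 'x'
--         else:
--             answer += str(num_sum[0]) + "x"
--     if not num_sum[1] == 0:
--         if not answer == '':
--             answer += ' + '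
--         answer += str(num_sum[1])
--     return answer
-- ===== SOURCE B (Python) =====
-- def solution(polynomial):
--     # divide-and-conquer: combine (coef, const) sums of the two halves of the token list
--     def sums(ts):
--         n = len(ts)
--         if n == 0:
--             return (0, 0)
--         if n == 1:
--             t = ts[0]
--             if t == '+':
--                 return (0, 0)
--             if 'x' in t:
--                 return (1 if t == 'x' else int(t[:-1]), 0)
--             return (0, int(t))
--         c1, k1 = sums(ts[:n // 2])
--         c2, k2 = sums(ts[n // 2:])
--         return (c1 + c2, k1 + k2)
--
--     coef, const = sums(polynomial.split())
--     xpart = '' if coef == 0 else ('x' if coef == 1 else str(coef) + 'x')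
--     cpart = '' if const == 0 else str(const)
--     if xpart and cpart:
--         return xpart + ' + ' + cpart
--     return xpart + cpart
-- ===== Notes on version B (the rewrite author's own statement) =====
-- stated objective: alternative
-- what changed: Replaced A's single left-to-right classifying loop over a two-slot accumulator and conditional-separator string concatenation by a divide-and-conquer recursion that splits the token list in half and adds the (coef, const) pair sums of the halves, plus a branch-free two-part formatting (xpart/cpart concatenation table).
import Mathlib
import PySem

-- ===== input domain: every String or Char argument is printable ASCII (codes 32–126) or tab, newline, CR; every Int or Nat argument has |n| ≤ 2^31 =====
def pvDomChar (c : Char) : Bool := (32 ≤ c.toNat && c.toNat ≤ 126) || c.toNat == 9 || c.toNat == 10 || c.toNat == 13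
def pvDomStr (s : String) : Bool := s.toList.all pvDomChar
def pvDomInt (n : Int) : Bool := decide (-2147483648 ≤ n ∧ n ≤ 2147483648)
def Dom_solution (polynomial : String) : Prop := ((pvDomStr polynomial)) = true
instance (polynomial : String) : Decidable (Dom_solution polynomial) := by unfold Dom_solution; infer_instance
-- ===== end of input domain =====

-- B replaces A's single classifying loop + conditional-separator concatenation by a
-- divide-and-conquer recursion over the token list plus a two-part formatting table
-- (objective: alternative).


-- ===== PORT A =====
-- num_sum = [0,0] is ported as a pair (coef, const); int(i[:-1]) / int(i) are total under
-- Pre_solution via .getD 0 (PySem.Int.ofChars? none = Python ValueError, excluded by Pre_).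
def solutionStep (s : Int × Int) (i : String) : Int × Int :=
  if i = "x" then (s.1 + 1, s.2)
  else if i = "+" then s
  else if PySem.Str.isIn "x" i then
    (s.1 + (PySem.Int.ofChars? (PySem.Chars.slice i.toList none (some (-1)))).getD 0, s.2)
  else (s.1, s.2 + (PySem.Int.ofStr? i).getD 0)

def solution (polynomial : String) : String :=
  let ns := (PySem.Str.split₀ polynomial).foldl solutionStep (0, 0)
  let ans1 : List Char :=
    if ¬ ns.1 = 0 then
      (if ns.1 = 1 then ['x'] else PySem.Int.toChars ns.1 ++ ['x'])
    else []
  let ans2 : List Char :=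
    if ¬ ns.2 = 0 then
      (if ¬ ans1 = [] then ans1 ++ [' ', '+', ' '] else ans1) ++ PySem.Int.toChars ns.2
    else ans1
  String.ofList ans2

-- ===== PORT B =====
-- the base case of Source B's sums: one token → its (coef, const) contribution
def altLeaf (t : String) : Int × Int :=
  if t = "+" then (0, 0)
  else if PySem.Str.isIn "x" t then
    ((if t = "x" then 1 else (PySem.Int.ofChars? t.toList.dropLast).getD 0), 0)
  else (0, (PySem.Int.ofStr? t).getD 0)

-- Source B's sums: divide and conquer on the token list, adding the pair sums of the halves
def altSums (ts : List String) : Int × Int :=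
  if ts.length = 0 then (0, 0)
  else if ts.length = 1 then altLeaf (ts.headD "")
  else
    let m := ts.length / 2
    let p1 := altSums (ts.take m)
    let p2 := altSums (ts.drop m)
    (p1.1 + p2.1, p1.2 + p2.2)
termination_by ts.length
decreasing_by
  · simpa [List.length_take] using by omega
  · simpa [List.length_drop] using by omega

def solution_alt (polynomial : String) : String :=
  let p := altSums (PySem.Str.split₀ polynomial)
  let xpart : List Char :=
    if p.1 = 0 then [] else if p.1 = 1 then ['x'] else PySem.Int.toChars p.1 ++ ['x']
  let cpart : List Char := if p.2 = 0 then [] else PySem.Int.toChars p.2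
  if xpart ≠ [] ∧ cpart ≠ [] then String.ofList (xpart ++ [' ', '+', ' '] ++ cpart)
  else String.ofList (xpart ++ cpart)

-- ===== PRECONDITION & SPEC =====
-- Pre_ admits exactly the inputs on which Python's int() never raises ValueError in A:
-- every token that is neither the bare variable nor the plus sign must parse as an int
-- (after dropping its trailing variable letter, if present); B raises on the same inputs.
def Pre_solution (polynomial : String) : Prop :=
  ∀ t ∈ PySem.Str.split₀ polynomial, t ≠ "x" → t ≠ "+" →
    (if PySem.Str.isIn "x" t
     then (PySem.Int.ofChars? t.toList.dropLast).isSome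
     else (PySem.Int.ofStr? t).isSome) = true
instance (polynomial : String) : Decidable (Pre_solution polynomial) := by
  unfold Pre_solution; infer_instance
def pvWitness_solution : String := "3x + 7 + x + -2"

def Spec_solution (polynomial : String) (out : String) : Prop := out = solution_alt polynomial
instance (polynomial : String) (out : String) : Decidable (Spec_solution polynomial out) := by
  unfold Spec_solution; infer_instance

-- ===== CLAIM (what is proved, stated in full; the proofs are below) =====
def Claim_equal_solution : Prop := ∀ (polynomial : String), Dom_solution polynomial →
  Pre_solution polynomial → Spec_solution polynomial (solution polynomial)

-- ===== LEMMAS AND PROOFS =====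
lemma step_eq (s : Int × Int) (t : String) :
    solutionStep s t = (s.1 + (altLeaf t).1, s.2 + (altLeaf t).2) := by
  unfold solutionStep altLeaf
  by_cases hx : t = "x"
  · subst hx; simp; exact ⟨by decide, by decide⟩
  · by_cases hp : t = "+"
    · subst hp; simp [show ¬("+" : String) = "x" from by decide]
    · simp only [if_neg hx, if_neg hp, PySem.Chars.slice_eq_listSlice,
        PySem.List.slice_to_neg_one]
      split_ifs <;> simp

lemma fold_eq (ts : List String) (a b : Int) :
    ts.foldl solutionStep (a, b) =
      (a + ((ts.map (fun t => (altLeaf t).1)).sum),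
       b + ((ts.map (fun t => (altLeaf t).2)).sum)) := by
  induction ts generalizing a b with
  | nil => simp
  | cons t ts ih => rw [List.foldl_cons, step_eq, ih]; simp; constructor <;> ring

lemma altSums_eq (ts : List String) :
    altSums ts = ((ts.map (fun t => (altLeaf t).1)).sum,
                  (ts.map (fun t => (altLeaf t).2)).sum) := by
  induction hn : ts.length using Nat.strong_induction_on generalizing ts with
  | _ n ih =>
    unfold altSums
    by_cases h0 : ts.length = 0
    · simp [List.length_eq_zero_iff.mp h0]
    · by_cases h1 : ts.length = 1
      · obtain ⟨t, rfl⟩ := List.length_eq_one_iff.mp h1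
        simp [h1]
      · have hlt1 : (ts.take (ts.length / 2)).length < n := by
          simp only [List.length_take]; omega
        have hlt2 : (ts.drop (ts.length / 2)).length < n := by
          simp only [List.length_drop]; omega
        rw [if_neg h0, if_neg h1]
        show ((altSums (ts.take (ts.length / 2))).1 + (altSums (ts.drop (ts.length / 2))).1,
              (altSums (ts.take (ts.length / 2))).2 + (altSums (ts.drop (ts.length / 2))).2) = _
        rw [ih _ hlt1 _ rfl, ih _ hlt2 _ rfl]
        have e : ∀ f : String → Int,
            ((ts.take (ts.length / 2)).map f).sum + ((ts.drop (ts.length / 2)).map f).sum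
              = (ts.map f).sum := by
          intro f; rw [← List.sum_append, ← List.map_append, List.take_append_drop]
        rw [e, e]

lemma toDigitsCore_ne_nil (b f n : Nat) (l : List Char) :
    Nat.toDigitsCore b (f + 1) n l ≠ [] := by
  induction f generalizing n l with
  | zero => rw [Nat.toDigitsCore]; split <;> simp [Nat.toDigitsCore]
  | succ f ih =>
    rw [Nat.toDigitsCore]
    split
    · simp
    · exact ih _ _

lemma toChars_ne_nil (n : Int) : PySem.Int.toChars n ≠ [] := by
  unfold PySem.Int.toChars Nat.toDigits
  split <;> simp [toDigitsCore_ne_nil]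

-- ===== VERDICT (by name: the statement is the Claim_ definition above) =====
theorem solution_spec : Claim_equal_solution := by
  intro polynomial _ _
  unfold Spec_solution solution solution_alt
  rw [fold_eq, altSums_eq]
  simp only [zero_add]
  set C := ((PySem.Str.split₀ polynomial).map (fun t => (altLeaf t).1)).sum with hC
  set K := ((PySem.Str.split₀ polynomial).map (fun t => (altLeaf t).2)).sum with hK
  by_cases h1 : C = 0 <;> by_cases h2 : K = 0 <;>
    by_cases h3 : C = 1 <;>
      simp [h1, h2, h3, toChars_ne_nil]
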